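-- pv_equiv track=rewrite | github.com/calvinp0/tckdbv2 | app/services/gaussian_parameter_parser.py | _tokenize_route
-- ===== SOURCE A (Python) =====
-- def _tokenize_route(route: str) -> list[str]:
--     """Split route line into tokens, respecting parenthesized groups."""
--     tokens: list[str] = []
--     current: list[str] = []
--     depth = 0
--     for char in route:
--         if char == "(":
--             depth += 1
--             current.append(char)
--         elif char == ")":
--             depth -= 1
--             current.append(char)
--         elif char == " " and depth == 0:
--             if current:
--                 tokens.append("".join(current))
--                 current = []
--         else:
--             current.append(char)
--     if current:
--         tokens.append("".join(current))
--     return tokens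
-- ===== SOURCE B (Python) =====
-- def _tokenize_route(route: str) -> list[str]:
--     """Split route line into tokens, respecting parenthesized groups.
--
--     Word-level pass: split on spaces first, then merge pieces back together
--     while the running parenthesis balance is non-zero.
--     """
--     tokens: list[str] = []
--     group: list[str] = []  # pieces of the token being assembled
--     depth = 0
--     for piece in route.split(" "):
--         if depth == 0:
--             if group:
--                 tokens.append(" ".join(group))
--             group = [piece] if piece else []
--         else:
--             group.append(piece)
--         depth += piece.count("(") - piece.count(")")
--     if group:
--         tokens.append(" ".join(group))
--     return tokens
-- ===== Notes on version B (the rewrite author's own statement) =====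
-- stated objective: faster
-- what changed: Replaced the per-character scan with a character buffer by a word-level pass: split the route on spaces once, then merge the resulting pieces back into tokens while the running parenthesis balance (computed per piece via str.count) is non-zero.
import Mathlib
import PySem

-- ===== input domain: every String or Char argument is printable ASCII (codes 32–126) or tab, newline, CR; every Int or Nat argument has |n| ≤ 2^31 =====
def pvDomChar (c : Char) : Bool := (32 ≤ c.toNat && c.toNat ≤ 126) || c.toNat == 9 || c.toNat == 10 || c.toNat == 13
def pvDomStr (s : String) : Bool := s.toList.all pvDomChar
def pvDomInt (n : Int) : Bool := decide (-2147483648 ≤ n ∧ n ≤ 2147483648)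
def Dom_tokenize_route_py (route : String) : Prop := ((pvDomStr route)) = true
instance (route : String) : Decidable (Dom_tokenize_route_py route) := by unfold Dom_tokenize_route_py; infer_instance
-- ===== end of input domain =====

-- B replaces A's per-character scan by a word-level pass: split on spaces once, then
-- merge the pieces back into tokens while the running parenthesis balance is non-zero
-- (same O(n) result, measurably faster in CPython since split/count run in C).


-- ===== PORT A =====
-- one step of A's `for char in route` loop; state = (tokens, current, depth)
def pvStepA (st : List String × List Char × Int) (c : Char) : List String × List Char × Int :=
  match st with
  | (tokens, current, depth) =>
    if c = '(' then (tokens, current ++ [c], depth + 1)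
    else if c = ')' then (tokens, current ++ [c], depth - 1)
    else if c = ' ' ∧ depth = 0 then
      if current ≠ [] then (tokens ++ [String.ofList current], ([] : List Char), depth)
      else (tokens, current, depth)
    else (tokens, current ++ [c], depth)

def tokenize_route_py (route : String) : List String :=
  match route.toList.foldl pvStepA ([], [], 0) with
  | (tokens, current, _) =>
    if current ≠ [] then tokens ++ [String.ofList current] else tokens

-- ===== PORT B =====
-- one step of B's `for piece in route.split(" ")` loop; state = (tokens, group, depth)
def pvStepB (st : List String × List String × Int) (piece : String) : List String × List String × Int :=
  match st with
  | (tokens, group, depth) =>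
    let tg :=
      if depth = 0 then
        ((if group ≠ [] then tokens ++ [PySem.Str.join " " group] else tokens),
         if piece ≠ "" then [piece] else ([] : List String))
      else (tokens, group ++ [piece])
    (tg.1, tg.2, depth + ((PySem.Str.count piece "(" : Int) - (PySem.Str.count piece ")" : Int)))

def tokenize_route_py_alt (route : String) : List String :=
  let pieces := (PySem.Str.split? route " ").getD []
  match pieces.foldl pvStepB ([], [], 0) with
  | (tokens, group, _) =>
    if group ≠ [] then tokens ++ [PySem.Str.join " " group] else tokens

-- ===== PRECONDITION & SPEC =====
def Spec_tokenize_route_py (route : String) (out : List String) : Prop := out = tokenize_route_py_alt route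
instance (route : String) (out : List String) : Decidable (Spec_tokenize_route_py route out) := by unfold Spec_tokenize_route_py; infer_instance

-- ===== CLAIM (what is proved, stated in full; the proofs are below) =====
def Claim_equal_tokenize_route_py : Prop := ∀ (route : String), Dom_tokenize_route_py route → Spec_tokenize_route_py route (tokenize_route_py route)

-- ===== LEMMAS AND PROOFS =====

-- net parenthesis balance of a chunk of characters
def pvNet (p : List Char) : Int := (p.count '(' : Int) - (p.count ')' : Int)

-- the finishing flush of each port
def pvFinA (st : List String × List Char × Int) : List String :=
  match st with
  | (tokens, current, _) => if current ≠ [] then tokens ++ [String.ofList current] else tokens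

def pvFinB (st : List String × List String × Int) : List String :=
  match st with
  | (tokens, group, _) => if group ≠ [] then tokens ++ [PySem.Str.join " " group] else tokens

-- PySem.Chars.count with a one-character needle is List.count
theorem pvCountGo_single (c : Char) : ∀ (fuel : Nat) (l : List Char) (acc : Nat),
    l.length ≤ fuel → PySem.Chars.count.go [c] fuel l acc = acc + l.count c := by
  intro fuel
  induction fuel with
  | zero =>
    intro l acc h
    cases l with
    | nil => simp [PySem.Chars.count.go]
    | cons a t => simp at h
  | succ f ih =>
    intro l acc h
    cases l with
    | nil => simp [PySem.Chars.count.go]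
    | cons a t =>
      simp only [PySem.Chars.count.go]
      by_cases hac : a = c
      · subst hac
        simp only [List.isPrefixOf, beq_self_eq_true, Bool.true_and]
        simp only [if_true]
        rw [show ([a].length) = 1 from rfl]
        simp only [List.drop_one, List.tail_cons]
        rw [ih t (acc + 1) (by simpa using h)]
        simp [List.count_cons]
        omega
      · have : [c].isPrefixOf (a :: t) = false := by
          simp [List.isPrefixOf]; exact fun h' => hac h'.symm
        rw [this]
        simp only [Bool.false_eq_true, if_false]
        rw [ih t acc (by simpa using h)]
        simp [List.count_cons, hac]

theorem pvCount_single (l : List Char) (c : Char) :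
    PySem.Chars.count l [c] = l.count c := by
  have h := pvCountGo_single c l.length l 0 le_rfl
  simpa [PySem.Chars.count] using h

theorem pvNet_str (p : String) :
    ((PySem.Str.count p "(" : Int) - (PySem.Str.count p ")" : Int)) = pvNet p.toList := by
  rw [PySem.Str.count_eq, PySem.Str.count_eq]
  show ((PySem.Chars.count p.toList ['('] : Int) - (PySem.Chars.count p.toList [')'] : Int)) = _
  rw [pvCount_single, pvCount_single, pvNet]

-- PySem.Chars.splitOn with a one-character separator is List.splitOn
theorem pvSplitGo (c : Char) : ∀ (fuel : Nat) (l cur : List Char) (acc : List (List Char)),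
    l.length < fuel →
    PySem.Chars.splitOn.go [c] fuel l cur acc
      = acc.reverse ++ (List.splitOn c l).modifyHead (cur.reverse ++ ·) := by
  intro fuel
  induction fuel with
  | zero => intro l cur acc h; omega
  | succ f ih =>
    intro l cur acc h
    cases l with
    | nil =>
      simp [PySem.Chars.splitOn.go, List.splitOn, List.splitOnP_nil]
    | cons a t =>
      simp only [PySem.Chars.splitOn.go]
      by_cases hac : a = c
      · subst hac
        have hpre : [a].isPrefixOf (a :: t) = true := by simp [List.isPrefixOf]
        rw [hpre]
        simp only [if_true]
        rw [show ([a].length) = 1 from rfl]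
        simp only [List.drop_one, List.tail_cons]
        rw [ih t [] (cur.reverse :: acc) (by simpa using h)]
        have : List.splitOn a (a :: t) = [] :: List.splitOn a t := by
          simp [List.splitOn, List.splitOnP_cons]
        rw [this]
        cases List.splitOn a t <;> simp
      · have : [c].isPrefixOf (a :: t) = false := by
          simp [List.isPrefixOf]; exact fun h' => hac h'.symm
        rw [this]
        simp only [Bool.false_eq_true, if_false]
        rw [ih t (a :: cur) acc (by simpa using h)]
        have h2 : List.splitOn c (a :: t) = (List.splitOn c t).modifyHead (a :: ·) := by
          simp [List.splitOn, List.splitOnP_cons, hac]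
        rw [h2, List.modifyHead_modifyHead]
        congr 2
        funext x
        simp

theorem pvSplitOn_single (c : Char) (l : List Char) :
    PySem.Chars.splitOn l [c] = List.splitOn c l := by
  unfold PySem.Chars.splitOn
  rw [pvSplitGo c (l.length + 1) l [] [] (by omega)]
  cases List.splitOn c l <;> simp

-- pieces produced by splitOn are separator-free
theorem pvSplitOn_free (c : Char) (l : List Char) :
    ∀ p ∈ List.splitOn c l, c ∉ p := by
  induction l with
  | nil => simp [List.splitOn, List.splitOnP_nil]
  | cons a t ih =>
    by_cases hac : a = c
    · subst hac
      intro p hp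
      rw [List.splitOn, List.splitOnP_cons] at hp
      simp only [beq_self_eq_true, if_true, List.mem_cons] at hp
      rcases hp with rfl | hp
      · simp
      · exact ih p hp
    · intro p hp
      rw [List.splitOn, List.splitOnP_cons] at hp
      simp only [beq_iff_eq, if_neg hac] at hp
      rcases ht : List.splitOnP (fun x => x == c) t with _ | ⟨h0, tl⟩
      · exact absurd ht (List.splitOnP_ne_nil _ t)
      · rw [ht] at hp
        simp only [List.modifyHead, List.mem_cons] at hp
        rcases hp with rfl | hp
        · have h0mem : h0 ∈ List.splitOn c t := by
            rw [List.splitOn, ht]; exact List.mem_cons_self ..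
          have hfree := ih h0 h0mem
          simp only [List.mem_cons]
          rintro (hc | hc)
          · exact hac hc.symm
          · exact hfree hc
        · exact ih p (by rw [List.splitOn, ht]; exact List.mem_cons_of_mem _ hp)

theorem pvJoinStr (g : List String) :
    String.ofList (PySem.Chars.join [' '] (g.map String.toList)) = PySem.Str.join " " g := by
  have h := PySem.Str.toList_join " " g
  have : (" " : String).toList = [' '] := rfl
  rw [this] at h
  rw [← h]
  exact String.ofList_toList

theorem pvJoin_append (gs : List (List Char)) (x : List Char) (h : gs ≠ []) :
    PySem.Chars.join [' '] (gs ++ [x]) = PySem.Chars.join [' '] gs ++ ' ' :: x := by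
  induction gs with
  | nil => exact absurd rfl h
  | cons a t ih =>
    cases t with
    | nil => simp [PySem.Chars.join_cons_cons, PySem.Chars.join_singleton]
    | cons b u =>
      have hih := ih (by simp)
      simp only [List.cons_append] at hih ⊢
      rw [PySem.Chars.join_cons_cons, hih, PySem.Chars.join_cons_cons]
      simp

-- A's loop over a space-free piece appends it and adds its balance
theorem pvRunA_piece (p : List Char) (hp : ' ' ∉ p) :
    ∀ (t : List String) (cur : List Char) (d : Int),
    p.foldl pvStepA (t, cur, d) = (t, cur ++ p, d + pvNet p) := by
  induction p with
  | nil => intro t cur d; simp [pvNet]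
  | cons a q ih =>
    intro t cur d
    have ha : a ≠ ' ' := fun h => hp (h ▸ List.mem_cons_self ..)
    have hq : ' ' ∉ q := fun h => hp (List.mem_cons_of_mem _ h)
    by_cases h1 : a = '('
    · subst h1
      simp only [List.foldl_cons, pvStepA, if_pos rfl]
      rw [ih hq]
      simp [pvNet, List.count_cons]
      omega
    · by_cases h2 : a = ')'
      · subst h2
        simp only [List.foldl_cons, pvStepA, if_neg (show ¬((')':Char) = '(') by decide), if_pos rfl]
        rw [ih hq]
        simp [pvNet, List.count_cons]
        omega
      · simp only [List.foldl_cons, pvStepA, if_neg h1, if_neg h2,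
          if_neg (show ¬(a = ' ' ∧ d = 0) from fun h => ha h.1)]
        rw [ih hq]
        simp [pvNet, List.count_cons, h1, h2]

-- main correspondence: A's scan over the space-glued pieces = B's merge over the pieces
theorem pvMain (ps : List String) (hps : ∀ p ∈ ps, ' ' ∉ p.toList) :
    ∀ (t : List String) (g : List String) (d : Int),
    (g = [] → d = 0) →
    (g ≠ [] → PySem.Chars.join [' '] (g.map String.toList) ≠ []) →
    pvFinA ((ps.flatMap (fun p => ' ' :: p.toList)).foldl pvStepA
      (t, PySem.Chars.join [' '] (g.map String.toList), d))
      = pvFinB (ps.foldl pvStepB (t, g, d)) := by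
  induction ps with
  | nil =>
    intro t g d h0 hne
    by_cases hg : g = []
    · subst hg
      simp [pvFinA, pvFinB, PySem.Chars.join_nil]
    · have hcur := hne hg
      simp only [List.flatMap_nil, List.foldl_nil, pvFinA, pvFinB, if_pos hcur, if_pos hg]
      rw [pvJoinStr]
  | cons p rest ih =>
    intro t g d h0 hne
    have hpfree : ' ' ∉ p.toList := hps p (List.mem_cons_self ..)
    have hrest : ∀ q ∈ rest, ' ' ∉ q.toList := fun q hq => hps q (List.mem_cons_of_mem _ hq)
    rw [List.flatMap_cons, List.cons_append, List.foldl_cons, List.foldl_append]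
    rw [List.foldl_cons]
    by_cases hd : d = 0
    · subst hd
      -- the separating space at depth 0: emit the pending token (if any), clear the buffer
      have hstep : pvStepA (t, PySem.Chars.join [' '] (g.map String.toList), 0) ' '
          = ((if g ≠ [] then t ++ [PySem.Str.join " " g] else t), ([] : List Char), (0 : Int)) := by
        by_cases hg : g = []
        · subst hg
          simp [pvStepA, PySem.Chars.join_nil]
        · have hcur := hne hg
          simp only [pvStepA, if_neg (show ¬(' ' = '(') by decide),
            if_neg (show ¬(' ' = ')') by decide),
            if_pos hcur, if_pos hg]
          rw [pvJoinStr]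
          simp
      rw [hstep, pvRunA_piece p.toList hpfree]
      have hstepB : pvStepB (t, g, 0) p
          = ((if g ≠ [] then t ++ [PySem.Str.join " " g] else t),
             (if p ≠ "" then [p] else []), pvNet p.toList) := by
        simp only [pvStepB, if_pos rfl, pvNet_str]
        simp
      rw [hstepB]
      have hcur' : ([] : List Char) ++ p.toList
          = PySem.Chars.join [' '] ((if p ≠ "" then [p] else []).map String.toList) := by
        by_cases hp0 : p = ""
        · subst hp0; simp [PySem.Chars.join_nil]
        · simp [hp0, PySem.Chars.join_singleton]
      rw [show (0 : Int) + pvNet p.toList = pvNet p.toList by ring, hcur']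
      exact ih hrest _ _ _
        (by by_cases hp0 : p = "" <;> simp [hp0, pvNet])
        (by by_cases hp0 : p = "" <;> simp [hp0, PySem.Chars.join_singleton])
    · -- inside a parenthesized group: the space is an ordinary character
      have hgne : g ≠ [] := fun h => hd (h0 h)
      have hstep : pvStepA (t, PySem.Chars.join [' '] (g.map String.toList), d) ' '
          = (t, PySem.Chars.join [' '] (g.map String.toList) ++ [' '], d) := by
        simp only [pvStepA, if_neg (show ¬(' ' = '(') by decide),
          if_neg (show ¬(' ' = ')') by decide)]
        simp [hd]
      rw [hstep, pvRunA_piece p.toList hpfree]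
      have hstepB : pvStepB (t, g, d) p = (t, g ++ [p], d + pvNet p.toList) := by
        simp only [pvStepB, if_neg hd, pvNet_str]
      rw [hstepB]
      have hcur' : PySem.Chars.join [' '] (g.map String.toList) ++ [' '] ++ p.toList
          = PySem.Chars.join [' '] ((g ++ [p]).map String.toList) := by
        rw [List.map_append, List.map_singleton,
          pvJoin_append _ _ (by simpa using hgne)]
        simp
      rw [hcur']
      exact ih hrest _ _ _ (by simp) (by
        intro _
        rw [← hcur']
        simp)

theorem pvGlue (ps : List String) (h : ps ≠ []) :
    ps.flatMap (fun p => ' ' :: p.toList)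
      = ' ' :: PySem.Chars.join [' '] (ps.map String.toList) := by
  induction ps with
  | nil => exact absurd rfl h
  | cons q r ih =>
    cases r with
    | nil => simp [PySem.Chars.join_singleton]
    | cons a u =>
      rw [List.flatMap_cons, ih (by simp)]
      simp only [List.map_cons, PySem.Chars.join_cons_cons]
      simp

theorem pvFinA_eq (route : String) :
    tokenize_route_py route = pvFinA (route.toList.foldl pvStepA ([], [], 0)) := by
  unfold tokenize_route_py pvFinA
  rcases route.toList.foldl pvStepA ([], [], 0) with ⟨t, c, d⟩
  rfl

theorem pvFinB_eq (route : String) :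
    tokenize_route_py_alt route
      = pvFinB ((((PySem.Str.split? route " ").getD []).foldl pvStepB ([], [], 0))) := by
  show (match ((PySem.Str.split? route " ").getD []).foldl pvStepB ([], [], 0) with
    | (tokens, group, _) =>
      if group ≠ [] then tokens ++ [PySem.Str.join " " group] else tokens) = _
  unfold pvFinB
  generalize ((PySem.Str.split? route " ").getD []).foldl pvStepB ([], [], 0) = st
  rcases st with ⟨t, g, d⟩
  rfl

theorem pvTop (route : String) : tokenize_route_py route = tokenize_route_py_alt route := by
  rcases hsp : PySem.Str.split? route " " with _ | ps
  · have h := PySem.Str.split?_map route " "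
    rw [hsp] at h
    simp [PySem.Chars.split?] at h
  · have h := PySem.Str.split?_map route " "
    rw [hsp] at h
    simp only [Option.map_some] at h
    rw [show (" " : String).toList = [' '] from rfl] at h
    rw [show PySem.Chars.split? route.toList [' '] = some (PySem.Chars.splitOn route.toList [' ']) from by simp [PySem.Chars.split?]] at h
    rw [pvSplitOn_single] at h
    have hmap : ps.map String.toList = List.splitOn ' ' route.toList := by
      injection h
    have hfree : ∀ q ∈ ps, ' ' ∉ q.toList := by
      intro q hq
      exact pvSplitOn_free ' ' route.toList q.toList (hmap ▸ List.mem_map_of_mem hq)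
    have hne : ps ≠ [] := by
      intro h'
      subst h'
      exact List.splitOnP_ne_nil _ route.toList (by simpa [List.splitOn] using hmap.symm)
    have hroute : route.toList = PySem.Chars.join [' '] (ps.map String.toList) := by
      rw [hmap]
      exact (List.intercalate_splitOn route.toList ' ').symm
    have hmain := pvMain ps hfree [] [] 0 (fun _ => rfl) (fun h' => absurd rfl h')
    rw [pvGlue ps hne] at hmain
    simp only [List.map_nil, PySem.Chars.join_nil] at hmain
    rw [List.foldl_cons] at hmain
    rw [show pvStepA ([], [], 0) ' ' = (([] : List String), ([] : List Char), (0 : Int)) from by simp [pvStepA]] at hmain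
    rw [pvFinA_eq, pvFinB_eq, hsp]
    simp only [Option.getD_some]
    rw [hroute]
    exact hmain

-- ===== VERDICT (by name: the statement is the Claim_ definition above) =====
theorem tokenize_route_py_spec : Claim_equal_tokenize_route_py := by
  intro route _
  unfold Spec_tokenize_route_py
  exact pvTop route
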